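-- pv_equiv track=rewrite | github.com/shashankvijendra/Leet-code-python | Neet-code/leet_code_problems.py | find_valid_pairs
-- ===== SOURCE A (Python) =====
-- def find_valid_pairs(arr, target):
--     arr.sort()  # Sort the array (preserves duplicates)
--     valid_pairs = []
--
--     for i in range(len(arr)):
--         for j in range(i + 1, len(arr)):
--             if abs(arr[j] - arr[i]) >= target:
--                 valid_pairs.append((arr[i], arr[j]))
--
--     return valid_pairs
-- ===== SOURCE B (Python) =====
-- def find_valid_pairs(arr, target):
--     arr.sort()  # in place, like A
--     n = len(arr)
--     res = []
--     for i, x in enumerate(arr):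
--         # first index lo with arr[lo] >= x + target (binary search, since arr is sorted)
--         lo, hi = 0, n
--         while lo < hi:
--             mid = (lo + hi) // 2
--             if arr[mid] < x + target:
--                 lo = mid + 1
--             else:
--                 hi = mid
--         res.extend((x, y) for y in arr[max(lo, i + 1):])
--     return res
-- ===== Notes on version B (the rewrite author's own statement) =====
-- stated objective: faster
-- what changed: Replaces the inner linear scan over all j>i with a per-i binary search for the first element >= arr[i]+target (the matches form a suffix of the sorted array), then appends that whole suffix; O(n log n + k) instead of O(n^2).
import Mathlib
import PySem

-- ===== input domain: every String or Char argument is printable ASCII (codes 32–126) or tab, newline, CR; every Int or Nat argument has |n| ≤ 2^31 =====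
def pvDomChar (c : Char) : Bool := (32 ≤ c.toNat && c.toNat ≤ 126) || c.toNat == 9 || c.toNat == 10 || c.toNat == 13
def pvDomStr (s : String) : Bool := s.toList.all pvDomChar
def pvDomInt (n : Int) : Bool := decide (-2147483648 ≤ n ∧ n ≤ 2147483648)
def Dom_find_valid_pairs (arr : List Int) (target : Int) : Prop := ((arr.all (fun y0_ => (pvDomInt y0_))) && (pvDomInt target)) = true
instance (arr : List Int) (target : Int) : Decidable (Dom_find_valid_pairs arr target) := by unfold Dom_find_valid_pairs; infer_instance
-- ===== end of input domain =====

-- B replaces A's inner linear scan with a per-i binary search for the first element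
-- >= arr[i]+target in the sorted array and appends the whole valid suffix.
-- (Both A and B sort the caller's list in place; the equivalence proved is about the return value.)


-- ===== PORT A =====
def find_valid_pairs (arr : List Int) (target : Int) : List (Int × Int) :=
  let s := PySem.List.sorted arr (fun z => z) false
  let n : Int := s.length
  (PySem.List.pyRange 0 n 1).foldl (fun vp i =>
    (PySem.List.pyRange (i + 1) n 1).foldl (fun vp j =>
      if target ≤ |PySem.List.pyGetD s j 0 - PySem.List.pyGetD s i 0| then
        vp ++ [(PySem.List.pyGetD s i 0, PySem.List.pyGetD s j 0)]
      else vp) vp) []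

-- ===== PORT B =====
-- the hand-written 'while lo < hi' binary search of Source B
def pvBisect (s : List Int) (v : Int) (lo hi : Int) : Int :=
  if _h : lo < hi then
    let mid := PySem.Int.floordiv (lo + hi) 2
    if PySem.List.pyGetD s mid 0 < v then pvBisect s v (mid + 1) hi
    else pvBisect s v lo mid
  else lo
termination_by (hi - lo).toNat
decreasing_by
  · have h1 := (PySem.Int.le_floordiv_iff_mul_le (a := lo + hi) (b := 2) (q := lo) (by omega)).mpr (by omega)
    have h2 := (PySem.Int.floordiv_lt_iff_lt_mul (a := lo + hi) (b := 2) (q := hi) (by omega)).mpr (by omega)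
    omega
  · have h1 := (PySem.Int.le_floordiv_iff_mul_le (a := lo + hi) (b := 2) (q := lo) (by omega)).mpr (by omega)
    have h2 := (PySem.Int.floordiv_lt_iff_lt_mul (a := lo + hi) (b := 2) (q := hi) (by omega)).mpr (by omega)
    omega

def find_valid_pairs_alt (arr : List Int) (target : Int) : List (Int × Int) :=
  let s := PySem.List.sorted arr (fun z => z) false
  let n : Int := s.length
  (PySem.List.enumerate s 0).foldl (fun res p =>
    let lo := pvBisect s (p.2 + target) 0 n
    res ++ (PySem.List.slice s (some (max lo (p.1 + 1))) none).map (fun y => (p.2, y))) []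

-- ===== PRECONDITION & SPEC =====
def Spec_find_valid_pairs (arr : List Int) (target : Int) (out : List (Int × Int)) : Prop := out = find_valid_pairs_alt arr target
instance (arr : List Int) (target : Int) (out : List (Int × Int)) : Decidable (Spec_find_valid_pairs arr target out) := by unfold Spec_find_valid_pairs; infer_instance

-- ===== CLAIM (what is proved, stated in full; the proofs are below) =====
def Claim_equal_find_valid_pairs : Prop := ∀ (arr : List Int) (target : Int), Dom_find_valid_pairs arr target → Spec_find_valid_pairs arr target (find_valid_pairs arr target)

-- ===== LEMMAS AND PROOFS =====

-- sorted-list indexing is monotone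
theorem pv_getD_mono (s : List Int) (hs : s.Pairwise (· ≤ ·)) {i j : Int}
    (h0 : 0 ≤ i) (hij : i ≤ j) (hj : j < (s.length : Int)) :
    PySem.List.pyGetD s i 0 ≤ PySem.List.pyGetD s j 0 := by
  rw [PySem.List.pyGetD_eq_getElem s 0 h0 (by omega),
      PySem.List.pyGetD_eq_getElem s 0 (by omega) hj]
  rcases eq_or_lt_of_le hij with h | h
  · subst h; exact le_rfl
  · exact (List.pairwise_iff_getElem.mp hs) i.toNat j.toNat (by omega) (by omega) (by omega)

-- step equations for the binary-search recursion
theorem pvBisect_step (s : List Int) (v lo hi : Int) (h : lo < hi) :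
    pvBisect s v lo hi =
      if PySem.List.pyGetD s (PySem.Int.floordiv (lo + hi) 2) 0 < v then
        pvBisect s v (PySem.Int.floordiv (lo + hi) 2 + 1) hi
      else pvBisect s v lo (PySem.Int.floordiv (lo + hi) 2) := by
  rw [pvBisect]; simp only [dif_pos h]

theorem pvBisect_stop (s : List Int) (v lo hi : Int) (h : ¬ lo < hi) :
    pvBisect s v lo hi = lo := by
  rw [pvBisect]; simp only [dif_neg h]

-- the binary search of Source B finds the cut point: everything left of it is < v, everything right is ≥ v
theorem pvBisect_spec_fuel (s : List Int) (hs : s.Pairwise (· ≤ ·)) (v : Int) :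
    ∀ (k : Nat) (lo hi : Int), (hi - lo).toNat ≤ k → 0 ≤ lo → lo ≤ hi → hi ≤ (s.length : Int) →
      lo ≤ pvBisect s v lo hi ∧ pvBisect s v lo hi ≤ hi ∧
      (∀ j : Int, lo ≤ j → j < pvBisect s v lo hi → PySem.List.pyGetD s j 0 < v) ∧
      (∀ j : Int, pvBisect s v lo hi ≤ j → j < hi → v ≤ PySem.List.pyGetD s j 0) := by
  intro k
  induction k with
  | zero =>
    intro lo hi hk h0 h1 h2
    have hge : ¬ lo < hi := by omega
    rw [pvBisect_stop s v lo hi hge]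
    exact ⟨le_rfl, h1, by omega, by omega⟩
  | succ k ih =>
    intro lo hi hk h0 h1 h2
    by_cases hlt : lo < hi
    · rw [pvBisect_step s v lo hi hlt]
      have hm1 := (PySem.Int.le_floordiv_iff_mul_le (a := lo + hi) (b := 2) (q := lo) (by omega)).mpr (by omega)
      have hm2 := (PySem.Int.floordiv_lt_iff_lt_mul (a := lo + hi) (b := 2) (q := hi) (by omega)).mpr (by omega)
      set mid := PySem.Int.floordiv (lo + hi) 2 with hmd
      by_cases hc : PySem.List.pyGetD s mid 0 < v
      · rw [if_pos hc]
        obtain ⟨r1, r2, r3, r4⟩ := ih (mid + 1) hi (by omega) (by omega) (by omega) h2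
        refine ⟨by omega, r2, ?_, r4⟩
        intro j hj1 hj2
        by_cases hjm : j ≤ mid
        · exact lt_of_le_of_lt (pv_getD_mono s hs (by omega) hjm (by omega)) hc
        · exact r3 j (by omega) hj2
      · rw [if_neg hc]
        obtain ⟨r1, r2, r3, r4⟩ := ih lo mid (by omega) h0 (by omega) (by omega)
        refine ⟨r1, by omega, r3, ?_⟩
        intro j hj1 hj2
        by_cases hjm : mid ≤ j
        · exact le_trans (not_lt.mp hc) (pv_getD_mono s hs (by omega) hjm (by omega))
        · exact r4 j hj1 (by omega)
    · rw [pvBisect_stop s v lo hi hlt]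
      exact ⟨le_rfl, h1, by omega, by omega⟩

theorem pvBisect_spec (s : List Int) (hs : s.Pairwise (· ≤ ·)) (v : Int)
    (lo hi : Int) (h0 : 0 ≤ lo) (h1 : lo ≤ hi) (h2 : hi ≤ (s.length : Int)) :
    lo ≤ pvBisect s v lo hi ∧ pvBisect s v lo hi ≤ hi ∧
      (∀ j : Int, lo ≤ j → j < pvBisect s v lo hi → PySem.List.pyGetD s j 0 < v) ∧
      (∀ j : Int, pvBisect s v lo hi ≤ j → j < hi → v ≤ PySem.List.pyGetD s j 0) :=
  pvBisect_spec_fuel s hs v (hi - lo).toNat lo hi le_rfl h0 h1 h2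

-- Prop-conditioned version of PySem.List.foldl_append_if
theorem pv_foldl_append_if {α β : Type} (p : α → Prop) [DecidablePred p] (f : α → β)
    (l : List α) (acc : List β) :
    l.foldl (fun acc x => if p x then acc ++ [f x] else acc) acc
      = acc ++ (l.filter (fun x => decide (p x))).map f := by
  induction l generalizing acc with
  | nil => simp
  | cons a t ih =>
    simp only [List.foldl_cons, List.filter_cons]
    by_cases h : p a
    · simp [h, ih, List.append_assoc]
    · simp [h, ih]

-- the per-i equality: A's filtered inner scan is exactly B's suffix
theorem pv_inner_eq (s : List Int) (hs : s.Pairwise (· ≤ ·)) (target i : Int)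
    (hi0 : 0 ≤ i) (hin : i < (s.length : Int)) :
    ((PySem.List.pyRange (i + 1) (s.length : Int) 1).filter
        (fun j => decide (target ≤ |PySem.List.pyGetD s j 0 - PySem.List.pyGetD s i 0|))).map
      (fun j => (PySem.List.pyGetD s i 0, PySem.List.pyGetD s j 0))
    = (PySem.List.slice s (some (max (pvBisect s (PySem.List.pyGetD s i 0 + target) 0 (s.length : Int)) (i + 1))) none).map
        (fun y => (PySem.List.pyGetD s i 0, y)) := by
  set x := PySem.List.pyGetD s i 0 with hx
  set r := pvBisect s (x + target) 0 (s.length : Int) with hr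
  obtain ⟨q1, q2, q3, q4⟩ := pvBisect_spec s hs (x + target) 0 (s.length : Int) le_rfl (by omega) le_rfl
  set m := max r (i + 1) with hm
  have hm1 : i + 1 ≤ m := le_max_right _ _
  have hm2 : m ≤ (s.length : Int) := by omega
  -- the condition holds on [i+1,n) exactly for j ≥ m
  have hcond : ∀ j : Int, i + 1 ≤ j → j < (s.length : Int) →
      ((target ≤ |PySem.List.pyGetD s j 0 - x|) ↔ m ≤ j) := by
    intro j hj1 hj2
    have hxy : x ≤ PySem.List.pyGetD s j 0 := pv_getD_mono s hs hi0 (by omega) hj2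
    rw [abs_of_nonneg (by omega)]
    constructor
    · intro h
      by_contra hc
      have := q3 j (by omega) (by omega)
      omega
    · intro h
      have := q4 j (by omega) hj2
      omega
  -- split the range at m
  rw [PySem.List.pyRange_one_append (i + 1) m (s.length : Int) hm1 hm2, List.filter_append]
  have hleft : (PySem.List.pyRange (i + 1) m 1).filter
      (fun j => decide (target ≤ |PySem.List.pyGetD s j 0 - x|)) = [] := by
    rw [List.filter_eq_nil_iff]
    intro j hj
    obtain ⟨ha, hb⟩ := PySem.List.mem_pyRange_one.mp hj
    simp only [decide_eq_true_eq]
    intro hcontra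
    have := (hcond j ha (by omega)).mp hcontra
    omega
  have hright : (PySem.List.pyRange m (s.length : Int) 1).filter
      (fun j => decide (target ≤ |PySem.List.pyGetD s j 0 - x|)) = PySem.List.pyRange m (s.length : Int) 1 := by
    rw [List.filter_eq_self]
    intro j hj
    obtain ⟨ha, hb⟩ := PySem.List.mem_pyRange_one.mp hj
    exact decide_eq_true ((hcond j (by omega) hb).mpr ha)
  rw [hleft, hright, List.nil_append]
  -- RHS: the slice is the drop, which is the map of pyGetD over the range
  rw [PySem.List.slice_from s (by omega : (0:Int) ≤ m)]
  rw [← PySem.List.map_pyGetD_pyRange s 0 (by omega : (0:Int) ≤ m)]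
  rw [List.map_map]
  rfl

theorem pv_flatMap_congr {α β : Type} {l : List α} {f g : α → List β}
    (h : ∀ x ∈ l, f x = g x) : l.flatMap f = l.flatMap g := by
  induction l with
  | nil => rfl
  | cons a t ih =>
    simp only [List.flatMap_cons, h a (List.mem_cons_self), ih (fun x hx => h x (List.mem_cons_of_mem a hx))]

-- ===== VERDICT (by name: the statement is the Claim_ definition above) =====
theorem find_valid_pairs_spec : Claim_equal_find_valid_pairs := by
  intro arr target _
  unfold Spec_find_valid_pairs find_valid_pairs find_valid_pairs_alt
  set s := PySem.List.sorted arr (fun z => z) false with hsdef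
  have hs : s.Pairwise (· ≤ ·) := PySem.List.sorted_pairwise arr (fun z => z)
  simp only []
  -- turn both folds into flatMaps over the index range
  have hA : ∀ (l : List Int) (acc : List (Int × Int)),
      l.foldl (fun vp i =>
        (PySem.List.pyRange (i + 1) (s.length : Int) 1).foldl (fun vp j =>
          if target ≤ |PySem.List.pyGetD s j 0 - PySem.List.pyGetD s i 0| then
            vp ++ [(PySem.List.pyGetD s i 0, PySem.List.pyGetD s j 0)]
          else vp) vp) acc
      = acc ++ l.flatMap (fun i =>
          ((PySem.List.pyRange (i + 1) (s.length : Int) 1).filter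
            (fun j => decide (target ≤ |PySem.List.pyGetD s j 0 - PySem.List.pyGetD s i 0|))).map
            (fun j => (PySem.List.pyGetD s i 0, PySem.List.pyGetD s j 0))) := by
    intro l
    induction l with
    | nil => intro acc; simp
    | cons a t ih =>
      intro acc
      simp only [List.foldl_cons, List.flatMap_cons]
      rw [pv_foldl_append_if
            (fun j => target ≤ |PySem.List.pyGetD s j 0 - PySem.List.pyGetD s a 0|)
            (fun j => (PySem.List.pyGetD s a 0, PySem.List.pyGetD s j 0))]
      rw [ih, List.append_assoc]
  have hB : ∀ (l : List (Int × Int)) (acc : List (Int × Int)),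
      l.foldl (fun res p =>
        res ++ (PySem.List.slice s
          (some (max (pvBisect s (p.2 + target) 0 (s.length : Int)) (p.1 + 1))) none).map
          (fun y => (p.2, y))) acc
      = acc ++ l.flatMap (fun p =>
          (PySem.List.slice s
            (some (max (pvBisect s (p.2 + target) 0 (s.length : Int)) (p.1 + 1))) none).map
            (fun y => (p.2, y))) :=
    fun l acc => PySem.List.foldl_append_eq_flatMap _ l acc
  rw [hA, hB, List.nil_append, List.nil_append]
  rw [PySem.List.enumerate_eq_map_pyRange s 0, List.flatMap_map]
  rw [show PySem.List.len s = (s.length : Int) from PySem.List.len_eq s]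
  apply pv_flatMap_congr
  intro i hi
  obtain ⟨h0, h1⟩ := PySem.List.mem_pyRange_one.mp hi
  exact pv_inner_eq s hs target i h0 h1
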